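-- pv_equiv track=rewrite | github.com/jandress94/MSongsDB | metrics.py | get_temporal_smoothness_metric
-- ===== SOURCE A (Python) =====
-- def get_temporal_smoothness_metric(comms_t1, comms_t2):
--     # get the mapping from nid to community id in times t1 and t2
--     nid_to_comm_map_t1 = {}
--     for comm_t1_idx in range(len(comms_t1)):
--         for n_t1 in comms_t1[comm_t1_idx]:
--             nid_to_comm_map_t1[n_t1] = comm_t1_idx
--     nid_to_comm_map_t2 = {}
--     for comm_t2_idx in range(len(comms_t2)):
--         for n_t2 in comms_t2[comm_t2_idx]:
--             nid_to_comm_map_t2[n_t2] = comm_t2_idx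
--
--     same_state_pairs = 0
--     diff_state_pairs = 0
--     for nid1 in nid_to_comm_map_t1:
--         if nid1 not in nid_to_comm_map_t2: continue
--         for nid2 in nid_to_comm_map_t1:
--             if nid2 not in nid_to_comm_map_t2: continue
--             if nid1 == nid2: continue
--
--             if (nid_to_comm_map_t1[nid1] == nid_to_comm_map_t1[nid2]) == (nid_to_comm_map_t2[nid1] == nid_to_comm_map_t2[nid2]):
--                 same_state_pairs += 1
--             else:
--                 diff_state_pairs += 1
--     return same_state_pairs, diff_state_pairs
-- ===== SOURCE B (Python) =====
-- def get_temporal_smoothness_metric(comms_t1, comms_t2):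
--     # get the mapping from nid to community id in times t1 and t2
--     nid_to_comm_map_t1 = {}
--     for comm_t1_idx in range(len(comms_t1)):
--         for n_t1 in comms_t1[comm_t1_idx]:
--             nid_to_comm_map_t1[n_t1] = comm_t1_idx
--     nid_to_comm_map_t2 = {}
--     for comm_t2_idx in range(len(comms_t2)):
--         for n_t2 in comms_t2[comm_t2_idx]:
--             nid_to_comm_map_t2[n_t2] = comm_t2_idx
--
--     # label every shared node by its (t1-community, t2-community) cell,
--     # then count pairs from contingency-table counts instead of a double loop
--     labels = [(nid_to_comm_map_t1[n], nid_to_comm_map_t2[n])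
--               for n in nid_to_comm_map_t1 if n in nid_to_comm_map_t2]
--     cnt1 = {}
--     cnt2 = {}
--     cnt12 = {}
--     for c1, c2 in labels:
--         cnt1[c1] = cnt1.get(c1, 0) + 1
--         cnt2[c2] = cnt2.get(c2, 0) + 1
--         cnt12[(c1, c2)] = cnt12.get((c1, c2), 0) + 1
--     n = len(labels)
--     s1 = sum(cnt1[c1] for c1, _ in labels)
--     s2 = sum(cnt2[c2] for _, c2 in labels)
--     s12 = sum(cnt12[p] for p in labels)
--     same = n * n - s1 - s2 + 2 * s12 - n
--     return same, n * (n - 1) - same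
-- ===== Notes on version B (the rewrite author's own statement) =====
-- stated objective: faster
-- what changed: replaces A's O(N^2) double loop over all pairs of shared nodes with a single O(N) pass that builds contingency-table counters (per t1-community, per t2-community, per joint cell) and combines them by an inclusion-exclusion formula
import Mathlib
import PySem

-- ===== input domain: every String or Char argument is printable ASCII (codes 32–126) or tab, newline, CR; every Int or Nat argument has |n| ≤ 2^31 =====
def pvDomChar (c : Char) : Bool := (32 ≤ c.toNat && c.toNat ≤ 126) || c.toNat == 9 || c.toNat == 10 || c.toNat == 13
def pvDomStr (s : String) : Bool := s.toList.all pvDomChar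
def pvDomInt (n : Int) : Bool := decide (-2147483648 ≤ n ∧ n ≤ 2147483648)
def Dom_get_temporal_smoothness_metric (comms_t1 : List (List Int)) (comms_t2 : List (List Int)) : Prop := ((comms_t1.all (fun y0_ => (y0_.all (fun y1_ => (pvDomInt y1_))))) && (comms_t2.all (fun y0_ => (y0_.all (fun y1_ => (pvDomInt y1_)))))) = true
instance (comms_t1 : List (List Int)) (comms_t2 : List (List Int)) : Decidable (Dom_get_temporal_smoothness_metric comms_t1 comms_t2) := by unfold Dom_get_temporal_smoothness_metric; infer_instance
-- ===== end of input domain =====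

-- ===== PORT A =====
-- B replaces A's O(N^2) double loop over node pairs with O(N) contingency-table counting; same return value.

-- shared helper: the two identical dict-building loops of both Pythons (nid -> community index, later overwrites)
def pvBuildMap (comms : List (List Int)) : PySem.Dict Int Int :=
  (PySem.List.pyRange 0 comms.length 1).foldl
    (fun d i => ((PySem.List.pyGet? comms i).getD []).foldl (fun d n => d.insert n i) d)
    PySem.Dict.empty

def get_temporal_smoothness_metric (comms_t1 : List (List Int)) (comms_t2 : List (List Int)) : Int × Int :=
  let m1 := pvBuildMap comms_t1
  let m2 := pvBuildMap comms_t2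
  m1.keys.foldl (fun (p : Int × Int) nid1 =>
    if (m2.get? nid1).isSome then
      m1.keys.foldl (fun (q : Int × Int) nid2 =>
        if (m2.get? nid2).isSome then
          if nid1 = nid2 then q
          else if ((m1.getD nid1 0 == m1.getD nid2 0) == (m2.getD nid1 0 == m2.getD nid2 0)) then
            (q.1 + 1, q.2)
          else (q.1, q.2 + 1)
        else q) p
    else p) (0, 0)

-- ===== PORT B =====
def get_temporal_smoothness_metric_alt (comms_t1 : List (List Int)) (comms_t2 : List (List Int)) : Int × Int :=
  let m1 := pvBuildMap comms_t1
  let m2 := pvBuildMap comms_t2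
  let labels := (m1.keys.filter (fun n => (m2.get? n).isSome)).map
      (fun n => (m1.getD n 0, m2.getD n 0))
  let cnt1 := labels.foldl (fun (d : PySem.Dict Int Int) x => d.insert x.1 (d.getD x.1 0 + 1)) PySem.Dict.empty
  let cnt2 := labels.foldl (fun (d : PySem.Dict Int Int) x => d.insert x.2 (d.getD x.2 0 + 1)) PySem.Dict.empty
  let cnt12 := labels.foldl (fun (d : PySem.Dict (Int × Int) Int) x => d.insert x (d.getD x 0 + 1)) PySem.Dict.empty
  let n : Int := labels.length
  let s1 := (labels.map (fun x => cnt1.getD x.1 0)).sum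
  let s2 := (labels.map (fun x => cnt2.getD x.2 0)).sum
  let s12 := (labels.map (fun x => cnt12.getD x 0)).sum
  let same := n * n - s1 - s2 + 2 * s12 - n
  (same, n * (n - 1) - same)

-- ===== PRECONDITION & SPEC =====
def Spec_get_temporal_smoothness_metric (comms_t1 : List (List Int)) (comms_t2 : List (List Int)) (out : Int × Int) : Prop := out = get_temporal_smoothness_metric_alt comms_t1 comms_t2
instance (comms_t1 : List (List Int)) (comms_t2 : List (List Int)) (out : Int × Int) : Decidable (Spec_get_temporal_smoothness_metric comms_t1 comms_t2 out) := by unfold Spec_get_temporal_smoothness_metric; infer_instance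

-- ===== CLAIM (what is proved, stated in full; the proofs are below) =====
def Claim_equal_get_temporal_smoothness_metric : Prop := ∀ (comms_t1 : List (List Int)) (comms_t2 : List (List Int)), Dom_get_temporal_smoothness_metric comms_t1 comms_t2 → Spec_get_temporal_smoothness_metric comms_t1 comms_t2 (get_temporal_smoothness_metric comms_t1 comms_t2)

-- ===== LEMMAS AND PROOFS =====

-- the shared (t1-label, t2-label) of a node
def pvLab (m1 m2 : PySem.Dict Int Int) (n : Int) : Int × Int := (m1.getD n 0, m2.getD n 0)

-- the nodes A's pair loop really ranges over
def pvKs (m1 m2 : PySem.Dict Int Int) : List Int := m1.keys.filter (fun n => (m2.get? n).isSome)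

lemma pvBuildMap_nodup_aux (comms : List (List Int)) :
    ∀ (l : List Int) (d : PySem.Dict Int Int), d.keys.Nodup →
      (l.foldl (fun d i => ((PySem.List.pyGet? comms i).getD []).foldl (fun d n => d.insert n i) d) d).keys.Nodup := by
  intro l
  induction l with
  | nil => intro d hd; exact hd
  | cons a t ih =>
      intro d hd
      exact ih _ (PySem.Dict.nodup_keys_foldl_insert _ (fun _ _ => a) _ hd)

lemma pvBuildMap_nodup (comms : List (List Int)) : (pvBuildMap comms).keys.Nodup :=
  pvBuildMap_nodup_aux comms _ _ PySem.Dict.nodup_keys_empty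

lemma pvKs_nodup (m1 m2 : PySem.Dict Int Int) (h : m1.keys.Nodup) : (pvKs m1 m2).Nodup :=
  h.filter _

-- a pair-accumulating foldl whose step adds (u a, v a) is the pair of sums
lemma foldl_pair_step {α : Type} (step : Int × Int → α → Int × Int) (u v : α → Int)
    (hs : ∀ q a, step q a = (q.1 + u a, q.2 + v a)) :
    ∀ (l : List α) (p : Int × Int), l.foldl step p = (p.1 + (l.map u).sum, p.2 + (l.map v).sum) := by
  intro l
  induction l with
  | nil => intro p; simp
  | cons a t ih =>
      intro p
      simp only [List.foldl_cons, List.map_cons, List.sum_cons, hs, ih]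
      rw [Prod.mk.injEq]
      constructor <;> ring

lemma sum_map_comb4 {α : Type} (l : List α) (c : Int) (f g h k : α → Int) :
    (l.map (fun a => c - f a - g a + 2 * h a - k a)).sum =
      c * l.length - (l.map f).sum - (l.map g).sum + 2 * (l.map h).sum - (l.map k).sum := by
  induction l with
  | nil => simp
  | cons a t ih => simp only [List.map_cons, List.sum_cons, List.length_cons, ih]; push_cast; ring

lemma sum_map_comb3 {α : Type} (l : List α) (f g h : α → Int) :
    (l.map (fun a => f a + g a - 2 * h a)).sum =
      (l.map f).sum + (l.map g).sum - 2 * (l.map h).sum := by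
  induction l with
  | nil => simp
  | cons a t ih => simp only [List.map_cons, List.sum_cons, ih]; ring

lemma sum_ind_eq_count {α β : Type} [BEq β] [LawfulBEq β] [DecidableEq β] (l : List α) (f : α → β) (v : β) :
    (l.map (fun a => if v = f a then (1 : Int) else 0)).sum = ((l.map f).count v : Int) := by
  induction l with
  | nil => simp
  | cons a t ih =>
      simp only [List.map_cons, List.sum_cons, List.count_cons, ih, beq_iff_eq]
      push_cast
      by_cases h : v = f a
      · rw [if_pos h, if_pos h.symm]; ring
      · rw [if_neg h, if_neg (fun hh => h hh.symm)]; ring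

-- per-node contingency counts over the shared nodes
def pvC1 (m1 m2 : PySem.Dict Int Int) (n1 : Int) : Int :=
  (((pvKs m1 m2).map (fun n2 => m1.getD n2 0)).count (m1.getD n1 0) : Int)
def pvC2 (m1 m2 : PySem.Dict Int Int) (n1 : Int) : Int :=
  (((pvKs m1 m2).map (fun n2 => m2.getD n2 0)).count (m2.getD n1 0) : Int)
def pvC12 (m1 m2 : PySem.Dict Int Int) (n1 : Int) : Int :=
  (((pvKs m1 m2).map (pvLab m1 m2)).count (pvLab m1 m2 n1) : Int)

-- A's same-pair indicator, written in inclusion-exclusion form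
lemma U_pointwise (m1 m2 : PySem.Dict Int Int) (n1 n2 : Int) :
    (if n1 = n2 then (0 : Int)
     else if ((m1.getD n1 0 == m1.getD n2 0) == (m2.getD n1 0 == m2.getD n2 0)) then 1 else 0)
  = 1 - (if m1.getD n1 0 = m1.getD n2 0 then 1 else 0)
      - (if m2.getD n1 0 = m2.getD n2 0 then 1 else 0)
      + 2 * (if pvLab m1 m2 n1 = pvLab m1 m2 n2 then 1 else 0)
      - (if n1 = n2 then 1 else 0) := by
  by_cases h : n1 = n2
  · subst h; simp [pvLab]
  · by_cases h1 : m1.getD n1 0 = m1.getD n2 0 <;>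
      by_cases h2 : m2.getD n1 0 = m2.getD n2 0 <;>
      simp [h, h1, h2, pvLab, Prod.ext_iff]

-- A's different-pair indicator, in the same form
lemma V_pointwise (m1 m2 : PySem.Dict Int Int) (n1 n2 : Int) :
    (if n1 = n2 then (0 : Int)
     else if ((m1.getD n1 0 == m1.getD n2 0) == (m2.getD n1 0 == m2.getD n2 0)) then 0 else 1)
  = (if m1.getD n1 0 = m1.getD n2 0 then 1 else 0)
      + (if m2.getD n1 0 = m2.getD n2 0 then 1 else 0)
      - 2 * (if pvLab m1 m2 n1 = pvLab m1 m2 n2 then 1 else 0) := by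
  by_cases h : n1 = n2
  · subst h; simp [pvLab]
  · by_cases h1 : m1.getD n1 0 = m1.getD n2 0 <;>
      by_cases h2 : m2.getD n1 0 = m2.getD n2 0 <;>
      simp [h, h1, h2, pvLab, Prod.ext_iff]

lemma U_sum (m1 m2 : PySem.Dict Int Int) (hnd : m1.keys.Nodup) :
    ((pvKs m1 m2).map (fun n1 => ((pvKs m1 m2).map (fun n2 =>
        if n1 = n2 then (0 : Int)
        else if ((m1.getD n1 0 == m1.getD n2 0) == (m2.getD n1 0 == m2.getD n2 0)) then 1 else 0)).sum)).sum
    = ((pvKs m1 m2).length : Int) * (pvKs m1 m2).length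
      - ((pvKs m1 m2).map (pvC1 m1 m2)).sum
      - ((pvKs m1 m2).map (pvC2 m1 m2)).sum
      + 2 * ((pvKs m1 m2).map (pvC12 m1 m2)).sum
      - (pvKs m1 m2).length := by
  have hk : (pvKs m1 m2).Nodup := pvKs_nodup m1 m2 hnd
  rw [List.map_congr_left (fun n1 hn1 => ?_)]
  · rw [sum_map_comb4 (pvKs m1 m2) ((pvKs m1 m2).length : Int)
        (pvC1 m1 m2) (pvC2 m1 m2) (pvC12 m1 m2) (fun _ => 1)]
    rw [PySem.List.sum_map_const_int]
    ring
  · -- the inner sum, pointwise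
    rw [List.map_congr_left (fun n2 _ => U_pointwise m1 m2 n1 n2)]
    rw [sum_map_comb4 (pvKs m1 m2) 1
        (fun n2 => if m1.getD n1 0 = m1.getD n2 0 then (1 : Int) else 0)
        (fun n2 => if m2.getD n1 0 = m2.getD n2 0 then (1 : Int) else 0)
        (fun n2 => if pvLab m1 m2 n1 = pvLab m1 m2 n2 then (1 : Int) else 0)
        (fun n2 => if n1 = n2 then (1 : Int) else 0)]
    rw [sum_ind_eq_count (pvKs m1 m2) (fun n2 => m1.getD n2 0) (m1.getD n1 0),
        sum_ind_eq_count (pvKs m1 m2) (fun n2 => m2.getD n2 0) (m2.getD n1 0),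
        sum_ind_eq_count (pvKs m1 m2) (pvLab m1 m2) (pvLab m1 m2 n1),
        sum_ind_eq_count (pvKs m1 m2) (fun n2 => n2) n1]
    have hid : ((pvKs m1 m2).map fun n2 => n2) = pvKs m1 m2 := List.map_id' _
    rw [hid, List.count_eq_one_of_mem hk hn1]
    simp only [pvC1, pvC2, pvC12]
    push_cast
    ring

lemma V_sum (m1 m2 : PySem.Dict Int Int) :
    ((pvKs m1 m2).map (fun n1 => ((pvKs m1 m2).map (fun n2 =>
        if n1 = n2 then (0 : Int)
        else if ((m1.getD n1 0 == m1.getD n2 0) == (m2.getD n1 0 == m2.getD n2 0)) then 0 else 1)).sum)).sum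
    = ((pvKs m1 m2).map (pvC1 m1 m2)).sum
      + ((pvKs m1 m2).map (pvC2 m1 m2)).sum
      - 2 * ((pvKs m1 m2).map (pvC12 m1 m2)).sum := by
  rw [List.map_congr_left (fun n1 hn1 => ?_)]
  · exact sum_map_comb3 (pvKs m1 m2) (pvC1 m1 m2) (pvC2 m1 m2) (pvC12 m1 m2)
  · rw [List.map_congr_left (fun n2 _ => V_pointwise m1 m2 n1 n2)]
    rw [sum_map_comb3 (pvKs m1 m2)
        (fun n2 => if m1.getD n1 0 = m1.getD n2 0 then (1 : Int) else 0)
        (fun n2 => if m2.getD n1 0 = m2.getD n2 0 then (1 : Int) else 0)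
        (fun n2 => if pvLab m1 m2 n1 = pvLab m1 m2 n2 then (1 : Int) else 0)]
    rw [sum_ind_eq_count (pvKs m1 m2) (fun n2 => m1.getD n2 0) (m1.getD n1 0),
        sum_ind_eq_count (pvKs m1 m2) (fun n2 => m2.getD n2 0) (m2.getD n1 0),
        sum_ind_eq_count (pvKs m1 m2) (pvLab m1 m2) (pvLab m1 m2 n1)]
    simp only [pvC1, pvC2, pvC12]

-- a counter keyed by f, looked up, is a count over the mapped list
lemma getD_counter_key {κ α : Type} [BEq κ] [LawfulBEq κ] (f : α → κ) (l : List α) (v : κ) :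
    (l.foldl (fun (d : PySem.Dict κ Int) x => d.insert (f x) (d.getD (f x) 0 + 1)) PySem.Dict.empty).getD v 0
      = ((l.map f).count v : Int) := by
  have h := PySem.Dict.getD_foldl_insert_add_one (l.map f) PySem.Dict.empty v
  rw [List.foldl_map] at h
  simpa using h


-- ===== VERDICT (by name: the statement is the Claim_ definition above) =====
theorem get_temporal_smoothness_metric_spec : Claim_equal_get_temporal_smoothness_metric := by
  intro c1 c2 _
  unfold Spec_get_temporal_smoothness_metric
  unfold get_temporal_smoothness_metric get_temporal_smoothness_metric_alt
  simp only []
  set m1 := pvBuildMap c1 with hm1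
  set m2 := pvBuildMap c2 with hm2
  -- A side: fold the membership tests into a filter
  rw [show (fun n => ((m1.getD n 0 : Int), (m2.getD n 0 : Int))) = pvLab m1 m2 from rfl]
  simp only [← List.foldl_filter]
  rw [show m1.keys.filter (fun n => (m2.get? n).isSome) = pvKs m1 m2 from rfl]
  -- A side: the two nested folds are a pair of double sums
  have hinner : ∀ n1 : Int, ∀ (r : Int × Int),
      (pvKs m1 m2).foldl (fun (q : Int × Int) n2 =>
        if n1 = n2 then q
        else if ((m1.getD n1 0 == m1.getD n2 0) == (m2.getD n1 0 == m2.getD n2 0)) then (q.1 + 1, q.2)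
        else (q.1, q.2 + 1)) r
      = (r.1 + ((pvKs m1 m2).map (fun n2 =>
            if n1 = n2 then (0 : Int)
            else if ((m1.getD n1 0 == m1.getD n2 0) == (m2.getD n1 0 == m2.getD n2 0)) then 1 else 0)).sum,
         r.2 + ((pvKs m1 m2).map (fun n2 =>
            if n1 = n2 then (0 : Int)
            else if ((m1.getD n1 0 == m1.getD n2 0) == (m2.getD n1 0 == m2.getD n2 0)) then 0 else 1)).sum) := by
    intro n1 r
    refine foldl_pair_step _ _ _ (fun q a => ?_) _ r
    split_ifs <;> simp
  rw [foldl_pair_step _ _ _ (fun q n1 => hinner n1 q) (pvKs m1 m2) (0, 0)]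
  rw [U_sum m1 m2 (pvBuildMap_nodup c1), V_sum m1 m2]
  -- B side: counter lookups are counts
  simp only [getD_counter_key Prod.fst, getD_counter_key Prod.snd,
    PySem.Dict.getD_foldl_insert_add_one, PySem.Dict.getD_empty, zero_add,
    List.map_map, List.length_map]
  rw [show ((fun x : Int × Int => ((List.count x.1 ((pvKs m1 m2).map (Prod.fst ∘ pvLab m1 m2)) : Nat) : Int)) ∘ pvLab m1 m2) = pvC1 m1 m2 from funext fun _ => rfl,
      show ((fun x : Int × Int => ((List.count x.2 ((pvKs m1 m2).map (Prod.snd ∘ pvLab m1 m2)) : Nat) : Int)) ∘ pvLab m1 m2) = pvC2 m1 m2 from funext fun _ => rfl,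
      show ((fun x : Int × Int => ((List.count x ((pvKs m1 m2).map (pvLab m1 m2)) : Nat) : Int)) ∘ pvLab m1 m2) = pvC12 m1 m2 from funext fun _ => rfl]
  rw [Prod.mk.injEq]
  constructor <;> ring
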